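-- pv_equiv track=rewrite | github.com/juliobarros-BR/SS-FBM-code | Sim_class.py | create_sim_sequence
-- ===== SOURCE A (Python) =====
-- def create_sim_sequence(cycles_pre_load, cycles_loaded, cycles_unload, period):
--     sequence_moist = []
--     sequence_load = []
--     sequence_time = []
--
--     sequence_moist.extend([0])
--     sequence_load.extend([0])
--     sequence_time.extend([0])
--
--     for _ in range(cycles_pre_load):
--         sequence_moist.extend([0, 0, 1, 0])
--         sequence_load.extend([0, 0, 0, 0])
--
--         last_time=sequence_time[-1]
--         sequence_time.extend([last_time, last_time + period, last_time + 2*period, last_time + 3*period])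
--
--     # Loading:
--
--     sequence_moist.append(0)
--     sequence_load.append(1)
--     sequence_time.append(sequence_time[-1])
--
--     for _ in range(cycles_loaded):
--         sequence_moist.extend([0, 0, 1, 0])
--         sequence_load.extend([1, 1, 1, 1])
--         last_time=sequence_time[-1]
--         sequence_time.extend([last_time, last_time + period, last_time + 2*period, last_time + 3*period])
--
--     # Unloading:
--     sequence_moist.append(0)
--     sequence_load.append(0)
--     sequence_time.append(sequence_time[-1])
--
--     for _ in range(cycles_unload):
--         sequence_moist.extend([0, 0, 1, 0])
--         sequence_load.extend([0, 0, 0, 0])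
--         last_time=sequence_time[-1]
--         sequence_time.extend([last_time, last_time + period, last_time + 2*period, last_time + 3*period])
--
--     return sequence_moist, sequence_load, sequence_time
-- ===== SOURCE B (Python) =====
-- def create_sim_sequence(cycles_pre_load, cycles_loaded, cycles_unload, period):
--     a = max(cycles_pre_load, 0)
--     b = max(cycles_loaded, 0)
--     c = max(cycles_unload, 0)
--
--     sequence_moist = [0] + [0, 0, 1, 0] * a + [0] + [0, 0, 1, 0] * b + [0] + [0, 0, 1, 0] * c
--     sequence_load = [0] + [0] * (4 * a) + [1] + [1] * (4 * b) + [0] + [0] * (4 * c)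
--
--     def blocks(n, t):
--         return [x for k in range(n)
--                 for x in (t + 3 * k * period,
--                           t + 3 * k * period + period,
--                           t + 3 * k * period + 2 * period,
--                           t + 3 * k * period + 3 * period)]
--
--     t1 = 3 * a * period
--     t2 = t1 + 3 * b * period
--     sequence_time = [0] + blocks(a, 0) + [t1] + blocks(b, t1) + [t2] + blocks(c, t2)
--
--     return sequence_moist, sequence_load, sequence_time
-- ===== Notes on version B (the rewrite author's own statement) =====
-- stated objective: simpler
-- what changed: Replaces A's three interleaved phase loops that mutate all three lists while tracking sequence_time[-1] with closed-form construction: moist/load built by list repetition in one expression each, and the time sequence assembled from per-phase blocks whose bases 3*k*period are computed directly.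
import Mathlib
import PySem

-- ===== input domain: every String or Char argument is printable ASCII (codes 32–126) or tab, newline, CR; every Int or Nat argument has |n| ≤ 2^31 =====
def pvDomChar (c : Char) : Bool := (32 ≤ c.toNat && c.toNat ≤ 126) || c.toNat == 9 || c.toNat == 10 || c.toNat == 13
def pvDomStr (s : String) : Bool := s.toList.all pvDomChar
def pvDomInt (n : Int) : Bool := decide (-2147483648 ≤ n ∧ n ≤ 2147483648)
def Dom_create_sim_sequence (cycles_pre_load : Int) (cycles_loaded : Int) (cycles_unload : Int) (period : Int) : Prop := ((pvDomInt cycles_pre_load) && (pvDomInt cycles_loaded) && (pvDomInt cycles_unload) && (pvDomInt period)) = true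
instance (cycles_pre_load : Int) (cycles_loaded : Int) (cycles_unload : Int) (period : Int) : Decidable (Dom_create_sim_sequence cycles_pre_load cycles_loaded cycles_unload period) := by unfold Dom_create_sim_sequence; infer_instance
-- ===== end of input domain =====

-- B replaces A's three stateful phase loops by closed-form list concatenation per output
-- list (objective: simpler, same cost).

-- ===== PORT A =====
-- one phase loop of A: 'for _ in range(n): extend moist/load; last_time = sequence_time[-1]; extend time'.
-- sequence_time[-1] is ported as getLastD 0: the list is nonempty at every call, so Python never raises here.
def simLoopA (n : Nat) (period : Int) (loadPat : List Int)
    (sm sl st : List Int) : List Int × List Int × List Int :=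
  match n with
  | 0 => (sm, sl, st)
  | Nat.succ m =>
      let last_time := st.getLastD 0
      simLoopA m period loadPat (sm ++ [0, 0, 1, 0]) (sl ++ loadPat)
        (st ++ [last_time, last_time + period, last_time + 2 * period, last_time + 3 * period])

def create_sim_sequence (cycles_pre_load : Int) (cycles_loaded : Int) (cycles_unload : Int) (period : Int) : List Int × List Int × List Int :=
  -- initial .extend([0]) on each list, then the three phases with their sentinel appends
  let r1 := simLoopA cycles_pre_load.toNat period [0, 0, 0, 0] [0] [0] [0]
  let sm1 := r1.1 ++ [0]
  let sl1 := r1.2.1 ++ [1]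
  let st1 := r1.2.2 ++ [r1.2.2.getLastD 0]
  let r2 := simLoopA cycles_loaded.toNat period [1, 1, 1, 1] sm1 sl1 st1
  let sm2 := r2.1 ++ [0]
  let sl2 := r2.2.1 ++ [0]
  let st2 := r2.2.2 ++ [r2.2.2.getLastD 0]
  simLoopA cycles_unload.toNat period [0, 0, 0, 0] sm2 sl2 st2

-- ===== PORT B =====
-- Source B's blocks(n, t): one time block per cycle k, base t + 3*k*period
def timeBlocks (n : Nat) (t : Int) (period : Int) : List Int :=
  (List.range n).flatMap (fun (k : Nat) =>
    [t + 3 * (k : Int) * period, t + 3 * (k : Int) * period + period,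
     t + 3 * (k : Int) * period + 2 * period, t + 3 * (k : Int) * period + 3 * period])

def create_sim_sequence_alt (cycles_pre_load : Int) (cycles_loaded : Int) (cycles_unload : Int) (period : Int) : List Int × List Int × List Int :=
  let a := cycles_pre_load.toNat
  let b := cycles_loaded.toNat
  let c := cycles_unload.toNat
  let sequence_moist :=
    [0] ++ (List.replicate a ([0, 0, 1, 0] : List Int)).flatten ++ [0] ++
      (List.replicate b ([0, 0, 1, 0] : List Int)).flatten ++ [0] ++
      (List.replicate c ([0, 0, 1, 0] : List Int)).flatten
  let sequence_load :=
    [0] ++ List.replicate (4 * a) (0 : Int) ++ [1] ++ List.replicate (4 * b) (1 : Int) ++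
      [0] ++ List.replicate (4 * c) (0 : Int)
  let t1 := 3 * (a : Int) * period
  let t2 := t1 + 3 * (b : Int) * period
  let sequence_time :=
    [0] ++ timeBlocks a 0 period ++ [t1] ++ timeBlocks b t1 period ++ [t2] ++ timeBlocks c t2 period
  (sequence_moist, sequence_load, sequence_time)

-- ===== PRECONDITION & SPEC =====
def Spec_create_sim_sequence (cycles_pre_load : Int) (cycles_loaded : Int) (cycles_unload : Int) (period : Int) (out : List Int × List Int × List Int) : Prop := out = create_sim_sequence_alt cycles_pre_load cycles_loaded cycles_unload period
instance (cycles_pre_load : Int) (cycles_loaded : Int) (cycles_unload : Int) (period : Int) (out : List Int × List Int × List Int) : Decidable (Spec_create_sim_sequence cycles_pre_load cycles_loaded cycles_unload period out) := by unfold Spec_create_sim_sequence; infer_instance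

-- ===== CLAIM (what is proved, stated in full; the proofs are below) =====
def Claim_equal_create_sim_sequence : Prop := ∀ (cycles_pre_load : Int) (cycles_loaded : Int) (cycles_unload : Int) (period : Int), Dom_create_sim_sequence cycles_pre_load cycles_loaded cycles_unload period → Spec_create_sim_sequence cycles_pre_load cycles_loaded cycles_unload period (create_sim_sequence cycles_pre_load cycles_loaded cycles_unload period)

-- ===== LEMMAS AND PROOFS =====

lemma timeBlocks_zero (t p : Int) : timeBlocks 0 t p = [] := rfl

lemma timeBlocks_succ (n : Nat) (t p : Int) :
    timeBlocks (n + 1) t p =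
      [t, t + p, t + 2 * p, t + 3 * p] ++ timeBlocks n (t + 3 * p) p := by
  unfold timeBlocks
  rw [List.range_succ_eq_map, List.flatMap_cons, List.flatMap_map]
  congr 1
  · norm_num
  · congr 1
    funext k
    push_cast
    ring_nf

lemma flatten_replicate_four (n : Nat) (x : Int) :
    (List.replicate n ([x, x, x, x] : List Int)).flatten = List.replicate (4 * n) x := by
  induction n with
  | zero => rfl
  | succ m ih =>
      rw [List.replicate_succ, List.flatten_cons, ih,
        show 4 * (m + 1) = 4 + 4 * m by ring, List.replicate_add]
      rfl

lemma getLastD_concat' (l : List Int) (x d : Int) : (l ++ [x]).getLastD d = x := by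
  simp [List.getLastD_eq_getLast?]

lemma getLastD_timeBlocks (l : List Int) (t p : Int) (n : Nat) :
    ((l ++ [t]) ++ timeBlocks n t p).getLastD 0 = t + 3 * n * p := by
  induction n generalizing l t with
  | zero => simp [timeBlocks_zero]
  | succ m ih =>
      rw [timeBlocks_succ]
      have : (l ++ [t]) ++ ([t, t + p, t + 2 * p, t + 3 * p] ++ timeBlocks m (t + 3 * p) p)
           = ((l ++ [t] ++ [t, t + p, t + 2 * p]) ++ [t + 3 * p]) ++ timeBlocks m (t + 3 * p) p := by
        simp
      rw [this, ih]
      push_cast; ring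

lemma simLoopA_eq (n : Nat) (p : Int) (lp : List Int) (sm sl st : List Int) (t : Int)
    (h : st.getLastD 0 = t) :
    simLoopA n p lp sm sl st =
      (sm ++ (List.replicate n ([0, 0, 1, 0] : List Int)).flatten,
       sl ++ (List.replicate n lp).flatten,
       st ++ timeBlocks n t p) := by
  induction n generalizing sm sl st t with
  | zero => simp [simLoopA, timeBlocks_zero]
  | succ m ih =>
      rw [simLoopA, h]
      have hlast : (st ++ [t, t + p, t + 2 * p, t + 3 * p]).getLastD 0 = t + 3 * p := by
        have : st ++ [t, t + p, t + 2 * p, t + 3 * p]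
             = (st ++ [t, t + p, t + 2 * p]) ++ [t + 3 * p] := by simp
        rw [this, getLastD_concat']
      rw [ih _ _ _ _ hlast, timeBlocks_succ]
      simp [List.replicate_succ]

theorem create_sim_sequence_eq_alt (a b c p : Int) :
    create_sim_sequence a b c p = create_sim_sequence_alt a b c p := by
  simp only [create_sim_sequence, create_sim_sequence_alt]
  rw [simLoopA_eq a.toNat p [0, 0, 0, 0] [0] [0] [0] 0 rfl]
  have key1 : (([0] : List Int) ++ timeBlocks a.toNat 0 p).getLastD 0
      = 3 * (a.toNat : Int) * p := by
    simpa using getLastD_timeBlocks [] 0 p a.toNat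
  rw [key1]
  rw [simLoopA_eq b.toNat p [1, 1, 1, 1] _ _ _ (3 * (a.toNat : Int) * p)
      (getLastD_concat' _ _ _)]
  have key2 := getLastD_timeBlocks ([0] ++ timeBlocks a.toNat 0 p)
      (3 * (a.toNat : Int) * p) p b.toNat
  rw [key2]
  rw [simLoopA_eq c.toNat p [0, 0, 0, 0] _ _ _
      (3 * (a.toNat : Int) * p + 3 * (b.toNat : Int) * p) (getLastD_concat' _ _ _)]
  simp [flatten_replicate_four, List.append_assoc]

-- ===== VERDICT (by name: the statement is the Claim_ definition above) =====
theorem create_sim_sequence_spec : Claim_equal_create_sim_sequence := by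
  intro a b c p _
  unfold Spec_create_sim_sequence
  exact create_sim_sequence_eq_alt a b c p
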